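-- pv_equiv track=rewrite | github.com/RafaelHuang87/Leet-Code-Practice | 420.py | lengthCheck
-- ===== SOURCE A (Python) =====
-- from typing import List
--
-- def lengthCheck(s:str) -> List[int]:
--     l = []
--     curr = 1
--     for i in range(1, len(s)):
--         if s[i] is s[i - 1]:
--             curr += 1
--         else:
--             if curr > 2:
--                 l.append(curr)
--             curr = 1
--     if curr > 2:
--         l.append(curr)
--     return l
-- ===== SOURCE B (Python) =====
-- def lengthCheck(s):
--     # boundaries-first: collect cut indices, then diff and filter
--     cuts = [0]
--     for i in range(1, len(s)):
--         if s[i] is not s[i - 1]: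
--             cuts.append(i)
--     cuts.append(len(s))
--     runs = [b - a for a, b in zip(cuts, cuts[1:])]
--     return [r for r in runs if r > 2]
-- ===== Notes on version B (the rewrite author's own statement) =====
-- stated objective: alternative
-- what changed: B first collects run-boundary (cut) indices in one scan, then derives run lengths as consecutive differences of the cut list and filters those > 2, instead of A's inline running counter with conditional appends.
import Mathlib
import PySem

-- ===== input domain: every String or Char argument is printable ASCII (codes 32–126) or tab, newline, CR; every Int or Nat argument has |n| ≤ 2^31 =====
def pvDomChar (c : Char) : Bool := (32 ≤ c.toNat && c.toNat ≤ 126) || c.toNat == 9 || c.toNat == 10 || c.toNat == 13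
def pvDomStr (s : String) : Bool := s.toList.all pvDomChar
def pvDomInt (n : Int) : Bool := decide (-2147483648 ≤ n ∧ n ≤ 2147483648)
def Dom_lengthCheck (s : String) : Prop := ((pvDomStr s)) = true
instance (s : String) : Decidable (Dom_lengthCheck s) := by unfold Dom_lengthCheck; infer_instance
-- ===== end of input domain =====

-- B collects run-boundary (cut) indices first and then diffs/filters them, instead of A's
-- inline running counter; same O(n) cost, alternative decomposition.
-- Python's `s[i] is s[i-1]` / `is not` is ported as (in)equality of the characters: on the
-- ASCII domain CPython interns single-character strings, so identity coincides with equality.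

-- ===== PORT A =====
-- loop body of A (state = (l, curr))
def lcStepA (cs : List Char) (p : List Int × Int) (i : Int) : List Int × Int :=
  if PySem.List.pyGet? cs i = PySem.List.pyGet? cs (i - 1) then
    (p.1, p.2 + 1)
  else
    ((if p.2 > 2 then p.1 ++ [p.2] else p.1), 1)

def lengthCheck (s : String) : List Int :=
  let cs := s.toList
  let st := (PySem.List.pyRange 1 (cs.length : Int) 1).foldl (lcStepA cs) ([], 1)
  if st.2 > 2 then st.1 ++ [st.2] else st.1

-- ===== PORT B =====
-- loop body of B's cut-collecting scan
def lcCutStep (cs : List Char) (acc : List Int) (i : Int) : List Int :=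
  if PySem.List.pyGet? cs i ≠ PySem.List.pyGet? cs (i - 1) then acc ++ [i] else acc

-- [b - a for a, b in zip(cuts, cuts[1:])]; cuts[1:] on a list is exactly List.tail here
def lcDiffs (xs : List Int) : List Int := (xs.zip xs.tail).map (fun p => p.2 - p.1)

def lengthCheck_alt (s : String) : List Int :=
  let cs := s.toList
  let cuts := ((PySem.List.pyRange 1 (cs.length : Int) 1).foldl (lcCutStep cs) [0]) ++ [(cs.length : Int)]
  (lcDiffs cuts).filter (fun r => r > 2)

-- ===== PRECONDITION & SPEC =====
def Spec_lengthCheck (s : String) (out : List Int) : Prop := out = lengthCheck_alt s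
instance (s : String) (out : List Int) : Decidable (Spec_lengthCheck s out) := by unfold Spec_lengthCheck; infer_instance

-- ===== CLAIM (what is proved, stated in full; the proofs are below) =====
def Claim_equal_lengthCheck : Prop := ∀ (s : String), Dom_lengthCheck s → Spec_lengthCheck s (lengthCheck s)

-- ===== LEMMAS AND PROOFS =====

lemma lcDiffs_append_last (xs : List Int) (c a : Int) (h : xs.getLast? = some c) :
    lcDiffs (xs ++ [a]) = lcDiffs xs ++ [a - c] := by
  induction xs with
  | nil => simp at h
  | cons x xs ih =>
    cases xs with
    | nil => simp_all [lcDiffs]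
    | cons y ys =>
      have h' : (y :: ys).getLast? = some c := by
        rwa [List.getLast?_cons_cons] at h
      have hih := ih h'
      simp only [lcDiffs, List.cons_append, List.tail_cons] at hih ⊢
      simp [hih]

-- loop invariant: after processing range(1, k) (1 ≤ k), the cut list is nonempty, its last
-- element is k - curr, and the filtered diffs of the cuts equal A's accumulated list l.
lemma lc_invariant (cs : List Char) (k : Nat) (hk : 1 ≤ k) :
    let A := (PySem.List.pyRange 1 (k : Int) 1).foldl (lcStepA cs) ([], 1)
    let G := (PySem.List.pyRange 1 (k : Int) 1).foldl (lcCutStep cs) [0]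
    G.getLast? = some ((k : Int) - A.2) ∧ (lcDiffs G).filter (fun r => r > 2) = A.1 := by
  induction k with
  | zero => omega
  | succ k ih =>
    rcases Nat.lt_or_ge 1 (k + 1) with h | h
    · have hk1 : 1 ≤ k := by omega
      have hle : (1 : Int) ≤ (k : Int) := by exact_mod_cast hk1
      obtain ⟨hlast, hfilt⟩ := ih hk1
      have hsplit : (PySem.List.pyRange 1 ((k : Int) + 1) 1)
          = PySem.List.pyRange 1 (k : Int) 1 ++ [(k : Int)] :=
        PySem.List.pyRange_one_succ_right hle
      intro A G
      have hA : A = lcStepA cs ((PySem.List.pyRange 1 (k : Int) 1).foldl (lcStepA cs) ([], 1)) (k : Int) := by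
        simp only [A, Nat.cast_succ, hsplit, List.foldl_append, List.foldl_cons, List.foldl_nil]
      have hG : G = lcCutStep cs ((PySem.List.pyRange 1 (k : Int) 1).foldl (lcCutStep cs) [0]) (k : Int) := by
        simp only [G, Nat.cast_succ, hsplit, List.foldl_append, List.foldl_cons, List.foldl_nil]
      set A0 := (PySem.List.pyRange 1 (k : Int) 1).foldl (lcStepA cs) ([], 1) with hA0
      set G0 := (PySem.List.pyRange 1 (k : Int) 1).foldl (lcCutStep cs) [0] with hG0
      by_cases hc : PySem.List.pyGet? cs (k : Int) = PySem.List.pyGet? cs ((k : Int) - 1)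
      · -- same char: counter grows, cut list unchanged
        have hA' : A = (A0.1, A0.2 + 1) := by rw [hA]; simp [lcStepA, hc]
        have hG' : G = G0 := by rw [hG]; simp [lcCutStep, hc]
        refine ⟨?_, ?_⟩
        · rw [hG', hA', hlast]; congr 1; push_cast; ring
        · rw [hG', hA']; exact hfilt
      · -- new run: A flushes curr, B records cut k
        have hA' : A = ((if A0.2 > 2 then A0.1 ++ [A0.2] else A0.1), 1) := by
          rw [hA]; unfold lcStepA; rw [if_neg hc]
        have hG' : G = G0 ++ [(k : Int)] := by
          rw [hG]; unfold lcCutStep; rw [if_pos hc]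
        refine ⟨?_, ?_⟩
        · rw [hG', hA']; simp
        · rw [hG', hA', lcDiffs_append_last G0 _ _ hlast,
            List.filter_append]
          have : (k : Int) - ((k : Int) - A0.2) = A0.2 := by ring
          rw [this, hfilt]
          by_cases h2 : A0.2 > 2 <;> simp [h2]
    · -- k + 1 = 1: empty range
      have hk0 : k = 0 := by omega
      subst hk0
      simp [PySem.List.pyRange_one_eq_nil (by norm_num : (1:Int) ≤ 1), lcDiffs]

-- ===== VERDICT (by name: the statement is the Claim_ definition above) =====
theorem lengthCheck_spec : Claim_equal_lengthCheck := by
  intro s _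
  show lengthCheck s = lengthCheck_alt s
  simp only [lengthCheck, lengthCheck_alt]
  rcases Nat.eq_zero_or_pos s.toList.length with h0 | hpos
  · rw [List.length_eq_zero_iff.mp h0]; decide
  · obtain ⟨hlast, hfilt⟩ := lc_invariant s.toList s.toList.length hpos
    set A := (PySem.List.pyRange 1 (s.toList.length : Int) 1).foldl (lcStepA s.toList) ([], 1)
    set G := (PySem.List.pyRange 1 (s.toList.length : Int) 1).foldl (lcCutStep s.toList) [0]
    rw [lcDiffs_append_last G _ _ hlast, List.filter_append, hfilt]
    have hmid : (s.toList.length : Int) - ((s.toList.length : Int) - A.2) = A.2 := by ring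
    rw [hmid]
    by_cases h2 : A.2 > 2 <;> simp [h2]
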